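-- pv_equiv track=rewrite | github.com/seemoo-lab/fastzip | Scheme/common/randomness.py | random_walk
-- ===== SOURCE A (Python) =====
-- def random_walk(key, sum_distribution, transition_count, transition_probs, bitlength=24):
--     ''' takes string of '0' and '1' and turns them into random walks in a galton board. Effectively computes
--     the cumulative sums distribution for every prefix of the input string. '''
--
--     transition_count[0] += 1
--     ret = [0]
--     for i, b in enumerate(key[:bitlength]):
--         val = -1
--         if b == '1':
--             val = 1
--             transition_probs[i] += 1
--         ret.append(ret[-1] + val)
--
--     sum_distribution.append(ret[-1])
--     return (sum_distribution, transition_count, transition_probs)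
-- ===== SOURCE B (Python) =====
-- def random_walk(key, sum_distribution, transition_count, transition_probs, bitlength=24):
--     ''' Same result as A, but computed without the cumulative walk list: the endpoint
--     is 2*ones - len(prefix) in closed form, and transition_probs is updated by a
--     vectorised zip-and-replace instead of indexed increments. '''
--     transition_count[0] += 1
--     prefix = key[:bitlength]
--     sum_distribution.append(2 * prefix.count('1') - len(prefix))
--     bumped = [t + (b == '1') for t, b in zip(transition_probs, prefix)]
--     transition_probs[:len(bumped)] = bumped
--     return (sum_distribution, transition_count, transition_probs)
-- ===== Notes on version B (the rewrite author's own statement) =====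
-- stated objective: simpler
-- what changed: B drops A's cumulative-walk list and indexed increments entirely: the endpoint is the closed form 2*prefix.count('1') - len(prefix), and transition_probs is rebuilt in one shot by zipping it with the prefix and splicing the bumped slice back, instead of A's per-index += inside the walk loop.
import Mathlib
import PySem

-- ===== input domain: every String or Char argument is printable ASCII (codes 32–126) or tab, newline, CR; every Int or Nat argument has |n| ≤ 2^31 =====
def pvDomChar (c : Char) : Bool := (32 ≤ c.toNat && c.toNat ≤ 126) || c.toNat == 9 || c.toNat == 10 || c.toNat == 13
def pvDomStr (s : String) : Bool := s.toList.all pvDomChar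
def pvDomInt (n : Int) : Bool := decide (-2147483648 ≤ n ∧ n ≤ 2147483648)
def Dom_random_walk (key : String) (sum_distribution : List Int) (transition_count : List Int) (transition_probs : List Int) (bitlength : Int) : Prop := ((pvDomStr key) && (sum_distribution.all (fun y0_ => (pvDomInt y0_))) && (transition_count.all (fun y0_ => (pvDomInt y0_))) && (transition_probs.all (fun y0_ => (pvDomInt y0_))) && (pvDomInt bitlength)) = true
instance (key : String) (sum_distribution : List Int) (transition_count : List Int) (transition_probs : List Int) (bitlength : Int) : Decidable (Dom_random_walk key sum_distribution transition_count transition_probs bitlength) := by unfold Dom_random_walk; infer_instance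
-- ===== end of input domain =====

-- B drops the cumulative-walk list (endpoint = 2*count('1') - len(prefix) in closed form) and replaces
-- A's per-index increments of transition_probs by a zip-with-the-prefix splice (objective: simpler).
-- Both Pythons mutate sum_distribution / transition_count / transition_probs in place; inside Pre_ the
-- mutations coincide and the ports model the returned triple, which carries exactly those lists.

-- ===== PORT A =====
-- transition_probs[i] += 1 / transition_count[0] += 1 (in range on every input Pre_ admits)
def pvIncAt : List Int → Nat → List Int
  | [], _ => []
  | x :: xs, 0 => (x + 1) :: xs
  | x :: xs, n + 1 => x :: pvIncAt xs n

-- the for-loop of A: carries ret and transition_probs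
def pvGoA : List (Int × Char) → List Int → List Int → List Int × List Int
  | [], ret, tp => (ret, tp)
  | (i, b) :: rest, ret, tp =>
      if b = '1' then pvGoA rest (ret ++ [ret.getLastD 0 + 1]) (pvIncAt tp i.toNat)
      else pvGoA rest (ret ++ [ret.getLastD 0 + (-1)]) tp

def random_walk (key : String) (sum_distribution : List Int) (transition_count : List Int) (transition_probs : List Int) (bitlength : Int) : List Int × List Int × List Int :=
  let tc := pvIncAt transition_count 0
  let pre := PySem.Chars.slice key.toList none (some bitlength)
  let (ret, tp) := pvGoA (PySem.List.enumerate pre) [0] transition_probs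
  (sum_distribution ++ [ret.getLastD 0], tc, tp)

-- ===== PORT B =====
def random_walk_alt (key : String) (sum_distribution : List Int) (transition_count : List Int) (transition_probs : List Int) (bitlength : Int) : List Int × List Int × List Int :=
  let tc := match transition_count with
            | [] => []            -- Python raises here; excluded by Pre_
            | t :: rest => (t + 1) :: rest
  let pre := PySem.Chars.slice key.toList none (some bitlength)
  let bumped := (transition_probs.zip pre).map (fun p => p.1 + (if p.2 = '1' then 1 else 0))
  (sum_distribution ++ [2 * (PySem.Chars.count pre ['1'] : Int) - pre.length], tc,
   bumped ++ transition_probs.drop bumped.length)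

-- ===== PRECONDITION & SPEC =====
-- Pre_ excludes exactly the inputs where Python A raises IndexError: an empty transition_count
-- (transition_count[0] += 1) or a '1' in the key prefix at an index ≥ len(transition_probs).
def Pre_random_walk (key : String) (sum_distribution : List Int) (transition_count : List Int) (transition_probs : List Int) (bitlength : Int) : Prop :=
  transition_count ≠ [] ∧
  ∀ p ∈ PySem.List.enumerate (PySem.Chars.slice key.toList none (some bitlength)),
    p.2 = '1' → p.1 < (transition_probs.length : Int)
instance (key : String) (sum_distribution : List Int) (transition_count : List Int) (transition_probs : List Int) (bitlength : Int) : Decidable (Pre_random_walk key sum_distribution transition_count transition_probs bitlength) := by unfold Pre_random_walk; infer_instance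

def pvWitness_random_walk : String × List Int × List Int × List Int × Int := ("0110a", [3], [0], [0, 0, 0, 0, 0], 4)

def Spec_random_walk (key : String) (sum_distribution : List Int) (transition_count : List Int) (transition_probs : List Int) (bitlength : Int) (out : List Int × List Int × List Int) : Prop := out = random_walk_alt key sum_distribution transition_count transition_probs bitlength
instance (key : String) (sum_distribution : List Int) (transition_count : List Int) (transition_probs : List Int) (bitlength : Int) (out : List Int × List Int × List Int) : Decidable (Spec_random_walk key sum_distribution transition_count transition_probs bitlength out) := by unfold Spec_random_walk; infer_instance

-- ===== CLAIM (what is proved, stated in full; the proofs are below) =====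
def Claim_equal_random_walk : Prop := ∀ (key : String) (sum_distribution : List Int) (transition_count : List Int) (transition_probs : List Int) (bitlength : Int), Dom_random_walk key sum_distribution transition_count transition_probs bitlength → Pre_random_walk key sum_distribution transition_count transition_probs bitlength → Spec_random_walk key sum_distribution transition_count transition_probs bitlength (random_walk key sum_distribution transition_count transition_probs bitlength)

-- ===== LEMMAS AND PROOFS =====

-- the bump applied to one element
def pvBump (p : Int × Char) : Int := p.1 + (if p.2 = '1' then 1 else 0)

-- incrementing past the end of the list is a no-op
theorem pvIncAt_oob : ∀ (l : List Int) (n : Nat), l.length ≤ n → pvIncAt l n = l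
  | [], _, _ => rfl
  | _ :: _, 0, h => by simp at h
  | x :: xs, n + 1, h => by
      simp only [pvIncAt, List.cons.injEq, true_and]
      exact pvIncAt_oob xs n (by simpa using h)

-- incrementing beyond a prefix acts on the tail
theorem pvIncAt_append : ∀ (a b : List Int) (n : Nat),
    pvIncAt (a ++ b) (a.length + n) = a ++ pvIncAt b n
  | [], b, n => by simp
  | x :: xs, b, n => by
      have : xs.length + n + 1 = (xs.length + n) + 1 := rfl
      simp only [List.cons_append, List.length_cons]
      show pvIncAt (x :: (xs ++ b)) (xs.length + 1 + n) = x :: (xs ++ pvIncAt b n)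
      have h1 : xs.length + 1 + n = (xs.length + n) + 1 := by omega
      rw [h1]
      simp only [pvIncAt, List.cons.injEq, true_and]
      exact pvIncAt_append xs b n

-- when the start index is past the end of tp, A's loop never touches tp
theorem pvGoA_tp_past : ∀ (cs : List Char) (s : Int) (ret tp : List Int),
    (tp.length : Int) ≤ s → (pvGoA (PySem.List.enumerate cs s) ret tp).2 = tp
  | [], _, _, _, _ => by simp [PySem.List.enumerate_nil, pvGoA]
  | c :: cs, s, ret, tp, h => by
      rw [PySem.List.enumerate_cons]
      by_cases hc : c = '1'
      · simp only [pvGoA, hc, if_true]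
        rw [pvIncAt_oob tp s.toNat (by omega)]
        exact pvGoA_tp_past cs (s + 1) _ tp (by omega)
      · simp only [pvGoA, if_neg hc]
        exact pvGoA_tp_past cs (s + 1) _ tp (by omega)

-- A's loop on pre ++ tp starting at index |pre| leaves pre alone and bumps tp pointwise with cs
theorem pvGoA_tp : ∀ (cs : List Char) (pre tp ret : List Int),
    (pvGoA (PySem.List.enumerate cs (pre.length : Int)) ret (pre ++ tp)).2
      = pre ++ ((tp.zip cs).map pvBump ++ tp.drop cs.length) := by
  intro cs
  induction cs with
  | nil => intro pre tp ret; simp [PySem.List.enumerate_nil, pvGoA]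
  | cons c cs ih =>
      intro pre tp ret
      rw [PySem.List.enumerate_cons]
      cases tp with
      | nil =>
          simp only [List.zip_nil_left, List.map_nil, List.drop_nil]
          by_cases hc : c = '1'
          · simp only [pvGoA, hc, if_true, List.append_nil]
            rw [pvIncAt_oob pre ((pre.length : Int)).toNat (by simp)]
            exact pvGoA_tp_past cs _ _ pre (by omega)
          · simp only [pvGoA, if_neg hc, List.append_nil]
            exact pvGoA_tp_past cs _ _ pre (by omega)
      | cons t ts =>
          by_cases hc : c = '1'
          · simp only [pvGoA, hc, if_true]
            have hinc : pvIncAt (pre ++ t :: ts) ((pre.length : Int)).toNat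
                = (pre ++ [t + 1]) ++ ts := by
              have : ((pre.length : Int)).toNat = pre.length + 0 := by simp
              rw [this, pvIncAt_append]
              simp [pvIncAt]
            rw [hinc]
            have hlen : ((pre ++ [t + 1]).length : Int) = (pre.length : Int) + 1 := by simp
            rw [← hlen, ih (pre ++ [t + 1]) ts _]
            simp [pvBump]
          · simp only [pvGoA, if_neg hc]
            have : (pre ++ t :: ts) = (pre ++ [t]) ++ ts := by simp
            rw [this]
            have hlen : ((pre ++ [t]).length : Int) = (pre.length : Int) + 1 := by simp
            rw [← hlen, ih (pre ++ [t]) ts _]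
            simp [pvBump, hc]

-- A's walk endpoint is the closed form over the enumerated prefix
theorem pvGoA_last (l : List (Int × Char)) : ∀ (ret tp : List Int),
    (pvGoA l ret tp).1.getLastD 0
      = ret.getLastD 0 + 2 * (l.countP (fun p => p.2 == '1') : Int) - l.length := by
  induction l with
  | nil => intro ret tp; simp [pvGoA]
  | cons hd rest ih =>
      intro ret tp
      obtain ⟨i, b⟩ := hd
      by_cases hb : b = '1'
      · simp only [pvGoA, hb, if_true, List.countP_cons, List.length_cons]
        rw [ih]
        rw [List.getLastD_concat]
        simp; ring
      · simp only [pvGoA, if_neg hb, List.countP_cons, List.length_cons]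
        rw [ih]
        rw [List.getLastD_concat]
        simp [hb]; ring

-- Python str.count with a single-character needle is the element count.
theorem pvCountGo_single (c : Char) : ∀ (fuel : Nat) (l : List Char) (acc : Nat),
    l.length ≤ fuel → PySem.Chars.count.go [c] fuel l acc = acc + l.count c := by
  intro fuel
  induction fuel with
  | zero =>
      intro l acc h
      have hl : l = [] := List.eq_nil_of_length_eq_zero (Nat.le_zero.mp h)
      subst hl; simp [PySem.Chars.count.go]
  | succ n ih =>
      intro l acc h
      cases l with
      | nil => simp [PySem.Chars.count.go]
      | cons x xs =>
          have hlen : xs.length ≤ n := by simpa using Nat.lt_succ_iff.mp (by simpa using h)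
          by_cases hc : c = x
          · subst hc
            have hp : List.isPrefixOf [c] (c :: xs) = true := by simp [List.isPrefixOf]
            simp only [PySem.Chars.count.go, hp, if_true, List.length_singleton, List.drop_succ_cons,
              List.drop_zero]
            rw [ih xs (acc + 1) hlen, List.count_cons]
            simp; omega
          · have hp : List.isPrefixOf [c] (x :: xs) = false := by simp [List.isPrefixOf, hc]
            simp only [PySem.Chars.count.go, hp, Bool.false_eq_true, if_false]
            rw [ih xs acc hlen, List.count_cons]
            simp [Ne.symm hc]

theorem pvCount_single (l : List Char) (c : Char) :
    PySem.Chars.count l [c] = l.count c := by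
  simp [PySem.Chars.count, pvCountGo_single c l.length l 0 le_rfl]

-- counting '1's through enumerate is counting '1's in the list itself
theorem pvCountP_enumerate (l : List Char) (s : Int) :
    (PySem.List.enumerate l s).countP (fun p => p.2 == '1') = l.count '1' := by
  induction l generalizing s with
  | nil => simp [PySem.List.enumerate_nil]
  | cons x xs ih => simp [PySem.List.enumerate_cons, List.countP_cons, ih, List.count_cons]

-- dropping min(|tp|, n) from tp is dropping n
theorem pvDrop_min (tp : List Int) (n : Nat) :
    tp.drop (min tp.length n) = tp.drop n := by
  by_cases h : tp.length ≤ n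
  · rw [Nat.min_eq_left h, List.drop_eq_nil_of_le le_rfl, List.drop_eq_nil_of_le h]
  · rw [Nat.min_eq_right (by omega)]

-- ===== VERDICT (by name: the statement is the Claim_ definition above) =====
theorem random_walk_spec : Claim_equal_random_walk := by
  intro key sd tc tp bl _ hpre
  unfold Spec_random_walk random_walk random_walk_alt
  obtain ⟨htc, _⟩ := hpre
  have hgo := pvGoA_tp (PySem.Chars.slice key.toList none (some bl)) [] tp [0]
  simp only [List.nil_append, Int.natCast_zero, List.length_nil] at hgo
  have hlast := pvGoA_last (PySem.List.enumerate (PySem.Chars.slice key.toList none (some bl))) [0] tp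
  cases tc with
  | nil => exact absurd rfl htc
  | cons t ts =>
      simp only [hgo, hlast, pvCountP_enumerate, pvCount_single, PySem.List.length_enumerate,
        pvIncAt, List.length_map, List.length_zip, pvDrop_min]
      simp [pvBump]
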